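-- pv_equiv track=rewrite | github.com/philippeschoeb/photonic_qml_benchmarking | tabular_data/merlin_additional/utils.py | generate_all_fock_states
-- ===== SOURCE A (Python) =====
-- from typing import Generator
-- from itertools import combinations
--
-- def generate_all_fock_states(m, n, no_bunching = False) -> Generator:
--     """Generates all possible Fock states for m modes and n photons."""
--     if no_bunching:
--         if n > m or n < 0:
--             return
--         for positions in combinations(range(m), n):
--             fock_state = [0] * m
--
--             for pos in positions:
--                 fock_state[pos] = 1
--             yield tuple(fock_state)
--
--     else:
--         if n == 0:
--             yield (0,) * m
--             return
--         if m == 1: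
--             yield (n,)
--             return
--
--         for i in reversed(range(n + 1)):
--             for state in generate_all_fock_states(m-1, n-i):
--                 yield (i,) + state
-- ===== SOURCE B (Python) =====
-- from itertools import combinations
--
-- def generate_all_fock_states(m, n, no_bunching=False):
--     """Generates all possible Fock states for m modes and n photons (bottom-up DP over modes)."""
--     if no_bunching:
--         if n > m or n < 0:
--             return
--         for positions in combinations(range(m), n):
--             fock_state = [0] * m
--             for pos in positions:
--                 fock_state[pos] = 1
--             yield tuple(fock_state)
--         return
--     if n == 0:
--         yield (0,) * m
--         return
--     if m == 1:
--         yield (n,)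
--         return
--     # bottom-up table: row[t] = all states with the current mode count and t photons
--     row = [[(t,)] for t in range(n + 1)]
--     for _ in range(m - 2):
--         row = [[(i,) + s for i in reversed(range(t + 1)) for s in row[t - i]]
--                for t in range(n + 1)]
--     yield from ((i,) + s for i in reversed(range(n + 1)) for s in row[n - i])
-- ===== Notes on version B (the rewrite author's own statement) =====
-- stated objective: alternative
-- what changed: The main branch is replaced by a bottom-up dynamic-programming table over mode counts (row[t] = all states for the current number of modes and t photons), built iteratively and shared across photon counts, instead of A's top-down recursive generator that recomputes sub-enumerations; the no_bunching branch is kept as-is.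
import Mathlib
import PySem

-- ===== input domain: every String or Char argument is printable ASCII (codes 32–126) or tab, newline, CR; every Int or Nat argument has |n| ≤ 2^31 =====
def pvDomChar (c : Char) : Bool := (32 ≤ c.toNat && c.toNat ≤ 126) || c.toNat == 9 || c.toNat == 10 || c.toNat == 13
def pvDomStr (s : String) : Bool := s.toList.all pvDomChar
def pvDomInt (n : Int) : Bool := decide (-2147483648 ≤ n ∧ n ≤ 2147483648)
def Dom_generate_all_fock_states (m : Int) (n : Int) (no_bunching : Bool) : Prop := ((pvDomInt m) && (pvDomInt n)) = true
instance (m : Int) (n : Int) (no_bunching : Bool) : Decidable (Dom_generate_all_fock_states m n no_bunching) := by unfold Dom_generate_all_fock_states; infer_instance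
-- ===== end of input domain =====

-- B replaces A's top-down recursive enumeration of the main branch by a bottom-up DP table over
-- mode counts (an alternative decomposition; the no_bunching branch is kept as in A).
-- Equivalence of the RETURN value (both Pythons are generators; we compare the lists they yield).

-- ===== PORT A =====
-- itertools.combinations(xs, k) in itertools' lexicographic order (shared library helper, used by both ports)
def pyCombinations : List Int → Nat → List (List Int)
  | _, 0 => [[]]
  | [], _ + 1 => []
  | x :: xs, k + 1 => (pyCombinations xs k).map (fun c => x :: c) ++ pyCombinations xs (k + 1)

-- the recursive else-branch of A, with m taken as the Nat m.toNat (faithful for the admitted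
-- inputs: for m ≤ 0 with n > 0 the Python recursion never terminates — excluded by Pre_)
def goA : Nat → Int → List (List Int)
  | mm, n =>
    if n = 0 then [List.replicate mm 0]
    else if mm = 1 then [[n]]
    else
      match mm with
      | 0 => []   -- Python diverges here (only reachable with n > 0, outside Pre_; for n < 0 Python yields nothing, as here)
      | mm' + 1 =>
        ((PySem.List.pyRange 0 (n + 1) 1).reverse).foldl
          (fun acc i => acc ++ (goA mm' (n - i)).map (fun s => i :: s)) []

def generate_all_fock_states (m : Int) (n : Int) (no_bunching : Bool) : List (List Int) :=
  if no_bunching then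
    if n > m ∨ n < 0 then []
    else
      -- positions come from range(m): nonnegative and < m, so .toNat and List.set are exact here
      (pyCombinations (PySem.List.pyRange 0 m 1) n.toNat).map (fun positions =>
        positions.foldl (fun fs pos => fs.set pos.toNat 1) (List.replicate m.toNat 0))
  else goA m.toNat n

-- ===== PORT B =====
def generate_all_fock_states_alt (m : Int) (n : Int) (no_bunching : Bool) : List (List Int) :=
  if no_bunching then
    if n > m ∨ n < 0 then []
    else
      (pyCombinations (PySem.List.pyRange 0 m 1) n.toNat).map (fun positions =>
        positions.foldl (fun fs pos => fs.set pos.toNat 1) (List.replicate m.toNat 0))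
  else if n = 0 then [List.replicate m.toNat 0]
  else if m = 1 then [[n]]
  else
    -- bottom-up table: row[t] = all states with the current mode count and t photons
    let row0 := (PySem.List.pyRange 0 (n + 1) 1).map (fun t => [[t]])
    let row := (List.range (m - 2).toNat).foldl
      (fun row _ =>
        (PySem.List.pyRange 0 (n + 1) 1).map (fun t =>
          ((PySem.List.pyRange 0 (t + 1) 1).reverse).flatMap (fun i =>
            (PySem.List.pyGetD row (t - i) []).map (fun s => i :: s)))) row0
    -- row[t - i] / row[n - i]: index always in [0, n], so pyGetD's default is never taken
    ((PySem.List.pyRange 0 (n + 1) 1).reverse).flatMap (fun i =>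
      (PySem.List.pyGetD row (n - i) []).map (fun s => i :: s))

-- ===== PRECONDITION & SPEC =====
-- Pre_ excludes exactly no_bunching = False with n > 0 and m ≤ 0: there A's recursion on m has no
-- base case and the Python generator raises RecursionError.
def Pre_generate_all_fock_states (m : Int) (n : Int) (no_bunching : Bool) : Prop :=
  no_bunching = true ∨ n ≤ 0 ∨ 1 ≤ m
instance (m : Int) (n : Int) (no_bunching : Bool) : Decidable (Pre_generate_all_fock_states m n no_bunching) := by unfold Pre_generate_all_fock_states; infer_instance

def pvWitness_generate_all_fock_states : Int × Int × Bool := (3, 2, false)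

def Spec_generate_all_fock_states (m : Int) (n : Int) (no_bunching : Bool) (out : List (List Int)) : Prop := out = generate_all_fock_states_alt m n no_bunching
instance (m : Int) (n : Int) (no_bunching : Bool) (out : List (List Int)) : Decidable (Spec_generate_all_fock_states m n no_bunching out) := by unfold Spec_generate_all_fock_states; infer_instance

-- ===== CLAIM (what is proved, stated in full; the proofs are below) =====
def Claim_equal_generate_all_fock_states : Prop := ∀ (m : Int) (n : Int) (no_bunching : Bool), Dom_generate_all_fock_states m n no_bunching → Pre_generate_all_fock_states m n no_bunching → Spec_generate_all_fock_states m n no_bunching (generate_all_fock_states m n no_bunching)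

-- ===== LEMMAS AND PROOFS =====

lemma goA_zero (mm : Nat) : goA mm 0 = [List.replicate mm 0] := by
  rw [goA.eq_def]; simp

lemma goA_one (t : Int) : goA 1 t = [[t]] := by
  rw [goA.eq_def]
  rcases eq_or_ne t 0 with rfl | h
  · simp
  · simp [h]

lemma goA_succ_succ (k : Nat) (n : Int) (hn : n ≠ 0) :
    goA (k + 2) n =
      ((PySem.List.pyRange 0 (n + 1) 1).reverse).flatMap
        (fun i => (goA (k + 1) (n - i)).map (fun s => i :: s)) := by
  rw [goA.eq_def]
  simp [hn, List.flatMap_def, List.map_reverse]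

lemma step_eq (n : Int) (j : Nat) :
    (PySem.List.pyRange 0 (n + 1) 1).map (fun t =>
      ((PySem.List.pyRange 0 (t + 1) 1).reverse).flatMap (fun i =>
        (PySem.List.pyGetD ((PySem.List.pyRange 0 (n + 1) 1).map (fun t => goA (j + 1) t)) (t - i) []).map (fun s => i :: s)))
    = (PySem.List.pyRange 0 (n + 1) 1).map (fun t => goA (j + 2) t) := by
  apply List.map_congr_left
  intro t ht
  rw [PySem.List.mem_pyRange_one] at ht
  rw [List.flatMap_congr (g := fun i => (goA (j + 1) (t - i)).map (fun s => i :: s)) ?_]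
  · rcases eq_or_ne t 0 with rfl | ht0
    · rw [show (0 : Int) + 1 = 0 + 1 from rfl, PySem.List.pyRange_one_singleton]
      simp [goA_zero, List.replicate_succ]
    · rw [goA_succ_succ j t ht0]
  · intro i hi
    rw [List.mem_reverse, PySem.List.mem_pyRange_one] at hi
    rw [PySem.List.pyGetD_map_pyRange_of_nonneg _ _ _ _ (by omega) (by omega)]

lemma rowB (n : Int) (j : Nat) :
    (List.range j).foldl
      (fun row _ =>
        (PySem.List.pyRange 0 (n + 1) 1).map (fun t =>
          ((PySem.List.pyRange 0 (t + 1) 1).reverse).flatMap (fun i =>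
            (PySem.List.pyGetD row (t - i) []).map (fun s => i :: s))))
      ((PySem.List.pyRange 0 (n + 1) 1).map (fun t => [[t]]))
    = (PySem.List.pyRange 0 (n + 1) 1).map (fun t => goA (j + 1) t) := by
  induction j with
  | zero => simp [goA_one]
  | succ j ih =>
    rw [List.range_succ, List.foldl_append, ih]
    simpa using step_eq n j

-- ===== VERDICT (by name: the statement is the Claim_ definition above) =====
theorem generate_all_fock_states_spec : Claim_equal_generate_all_fock_states := by
  intro m n nb hdom hpre
  unfold Spec_generate_all_fock_states
  unfold generate_all_fock_states generate_all_fock_states_alt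
  cases nb with
  | true => rfl
  | false =>
    simp only [Bool.false_eq_true, if_false]
    rcases eq_or_ne n 0 with rfl | hn0
    · simp [goA_zero]
    · rcases eq_or_ne m 1 with rfl | hm1
      · simp [hn0, goA_one]
      · simp only [if_neg hn0, if_neg hm1]
        rcases lt_or_ge n 0 with hn | hn
        · -- n < 0: both sides are empty
          have hr : PySem.List.pyRange 0 (n + 1) 1 = [] := PySem.List.pyRange_one_eq_nil (by omega)
          have hA : goA m.toNat n = [] := by
            rw [goA.eq_def]
            have h1 : m.toNat ≠ 1 := by omega
            rcases hmm : m.toNat with _ | mm'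
            · simp [hn0]
            · have h2 : mm' ≠ 0 := by omega
              simp [hn0, h2, hr]
          rw [hA, hr]
          simp
        · -- 0 < n (n ≠ 0) and, by Pre_, 1 ≤ m with m ≠ 1, so 2 ≤ m
          have hm2 : 2 ≤ m := by
            rcases hpre with h | h | h
            · simp at h
            · omega
            · omega
          have hk : m.toNat = (m - 2).toNat + 2 := by omega
          rw [hk, goA_succ_succ _ n hn0, rowB n ((m - 2).toNat)]
          apply List.flatMap_congr
          intro i hi
          rw [List.mem_reverse, PySem.List.mem_pyRange_one] at hi
          rw [PySem.List.pyGetD_map_pyRange_of_nonneg _ _ _ _ (by omega) (by omega)]
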